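-- pv_equiv track=rewrite | github.com/afansecic/behavioral_cloning_atari | point_mass.py | create_training_data_from_bins
-- ===== SOURCE A (Python) =====
-- def create_training_data_from_bins(ranked_demos):
--
--
--     step = 4
--     #n_train = 3000 #number of pairs of trajectories to create
--     #snippet_length = 50
--     training_obs = []
--     training_labels = []
--     num_ranked_bins = len(ranked_demos)
--     #pick progress based snippets
--     for i in range(num_ranked_bins):
--         for ti in ranked_demos[i]:
--             for j in range(i+1, num_ranked_bins):
--                 for tj in ranked_demos[j]:
--                     training_obs.append((ti, tj))
--                     training_labels.append(1)
--
--
--     return training_obs, training_labels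
-- ===== SOURCE B (Python) =====
-- def create_training_data_from_bins(ranked_demos):
--     # back-to-front pass: maintain the flattened suffix of later bins once,
--     # instead of re-scanning later bins per trajectory
--     suffix = []
--     chunks = []
--     for bin_trajs in reversed(ranked_demos):
--         chunks.append([(ti, tj) for ti in bin_trajs for tj in suffix])
--         suffix = bin_trajs + suffix
--     training_obs = [p for chunk in reversed(chunks) for p in chunk]
--     return training_obs, [1] * len(training_obs)
-- ===== Notes on version B (the rewrite author's own statement) =====
-- stated objective: alternative
-- what changed: Replaces the four-level index loop (which re-scans all later bins for every trajectory) by a single back-to-front pass that maintains the flattened suffix of later bins incrementally, then materialises labels as [1]*len(obs) instead of lockstep appends.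
import Mathlib
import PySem

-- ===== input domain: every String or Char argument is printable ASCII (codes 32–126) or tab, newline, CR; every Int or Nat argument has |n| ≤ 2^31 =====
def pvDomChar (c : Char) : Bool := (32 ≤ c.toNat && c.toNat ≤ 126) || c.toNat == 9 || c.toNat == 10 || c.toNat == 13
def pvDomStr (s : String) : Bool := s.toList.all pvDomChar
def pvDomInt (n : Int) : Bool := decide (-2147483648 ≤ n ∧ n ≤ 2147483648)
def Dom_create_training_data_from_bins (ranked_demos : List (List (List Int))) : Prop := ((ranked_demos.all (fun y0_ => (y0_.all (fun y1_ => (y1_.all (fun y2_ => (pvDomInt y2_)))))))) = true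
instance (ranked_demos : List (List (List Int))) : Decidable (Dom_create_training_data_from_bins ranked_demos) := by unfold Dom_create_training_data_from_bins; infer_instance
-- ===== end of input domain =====

-- B replaces A's four-level index loop by a single back-to-front pass that maintains the
-- flattened suffix of later bins incrementally and materialises the labels as [1]*len(obs);
-- equivalence of the return values is proved for all inputs (A is total).

-- ===== PORT A =====
def create_training_data_from_bins (ranked_demos : List (List (List Int))) : (List (List Int × List Int)) × List Int :=
  -- step = 4 in the Python source is unused
  let num_ranked_bins : Int := ranked_demos.length
  (PySem.List.pyRange 0 num_ranked_bins 1).foldl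
    (fun st i =>
      (PySem.List.pyGetD ranked_demos i []).foldl
        (fun st ti =>
          (PySem.List.pyRange (i + 1) num_ranked_bins 1).foldl
            (fun st j =>
              (PySem.List.pyGetD ranked_demos j []).foldl
                (fun st tj => (st.1 ++ [(ti, tj)], st.2 ++ [(1 : Int)])) st)
            st)
        st)
    (([] : List (List Int × List Int)), ([] : List Int))

-- ===== PORT B =====
-- back-to-front pass: returns (flattened suffix of all bins seen, pair chunks in bin order)
def pvAltGo (rd : List (List (List Int))) : List (List Int) × List (List Int × List Int) :=
  match rd with
  | [] => ([], [])
  | b :: rest =>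
    let p := pvAltGo rest
    (b ++ p.1, (b.flatMap fun ti => p.1.map fun tj => (ti, tj)) ++ p.2)

def create_training_data_from_bins_alt (ranked_demos : List (List (List Int))) : (List (List Int × List Int)) × List Int :=
  let training_obs := (pvAltGo ranked_demos).2
  (training_obs, List.replicate training_obs.length 1)

-- ===== PRECONDITION & SPEC =====
def Spec_create_training_data_from_bins (ranked_demos : List (List (List Int))) (out : (List (List Int × List Int)) × List Int) : Prop := out = create_training_data_from_bins_alt ranked_demos
instance (ranked_demos : List (List (List Int))) (out : (List (List Int × List Int)) × List Int) : Decidable (Spec_create_training_data_from_bins ranked_demos out) := by unfold Spec_create_training_data_from_bins; infer_instance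

-- ===== CLAIM (what is proved, stated in full; the proofs are below) =====
def Claim_equal_create_training_data_from_bins : Prop := ∀ (ranked_demos : List (List (List Int))), Dom_create_training_data_from_bins ranked_demos → Spec_create_training_data_from_bins ranked_demos (create_training_data_from_bins ranked_demos)

-- ===== LEMMAS AND PROOFS =====

-- the shape of A's inner loops: each step appends g x to the obs side and a matching
-- block of 1s to the label side
lemma pv_foldl_pair_shape {α β : Type} (g : α → List β)
    (F : (List β × List Int) → α → (List β × List Int))
    (hF : ∀ (o : List β) (l : List Int) (x : α),
      F (o, l) x = (o ++ g x, l ++ List.replicate (g x).length 1))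
    (xs : List α) (o : List β) (l : List Int) :
    xs.foldl F (o, l)
      = (o ++ xs.flatMap g, l ++ List.replicate (xs.flatMap g).length 1) := by
  induction xs generalizing o l with
  | nil => simp
  | cons x xs ih =>
    rw [List.foldl_cons, hF, ih]
    simp only [List.flatMap_cons, List.length_append, List.replicate_add, List.append_assoc]

-- A's observation list, written as nested flatMaps over the index ranges
def pvObs (rd : List (List (List Int))) : List (List Int × List Int) :=
  (PySem.List.pyRange 0 (rd.length : Int) 1).flatMap fun i =>
    (PySem.List.pyGetD rd i []).flatMap fun ti =>
      (PySem.List.pyRange (i + 1) (rd.length : Int) 1).flatMap fun j =>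
        (PySem.List.pyGetD rd j []).map fun tj => (ti, tj)

lemma pv_A_eq (rd : List (List (List Int))) :
    create_training_data_from_bins rd = (pvObs rd, List.replicate (pvObs rd).length 1) := by
  have h1 : ∀ (ti : List Int) (bj : List (List Int)) (o : List (List Int × List Int)) (l : List Int),
      bj.foldl (fun st tj => (st.1 ++ [(ti, tj)], st.2 ++ [(1 : Int)])) (o, l)
      = (o ++ bj.map (fun tj => (ti, tj)),
         l ++ List.replicate (bj.map (fun tj => (ti, tj))).length 1) := by
    intro ti bj o l
    have := pv_foldl_pair_shape (g := fun tj => [(ti, tj)])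
      (F := fun st tj => (st.1 ++ [(ti, tj)], st.2 ++ [(1 : Int)]))
      (by intro o l x; rfl) bj o l
    rw [this]
    simp [List.map_eq_flatMap]
  have h2 : ∀ (i : Int) (ti : List Int) (o : List (List Int × List Int)) (l : List Int),
      (PySem.List.pyRange (i + 1) (rd.length : Int) 1).foldl
        (fun st j =>
          (PySem.List.pyGetD rd j []).foldl
            (fun st tj => (st.1 ++ [(ti, tj)], st.2 ++ [(1 : Int)])) st) (o, l)
      = (o ++ ((PySem.List.pyRange (i + 1) (rd.length : Int) 1).flatMap fun j =>
                (PySem.List.pyGetD rd j []).map fun tj => (ti, tj)),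
         l ++ List.replicate ((PySem.List.pyRange (i + 1) (rd.length : Int) 1).flatMap fun j =>
                (PySem.List.pyGetD rd j []).map fun tj => (ti, tj)).length 1) := by
    intro i ti o l
    exact pv_foldl_pair_shape
      (g := fun j => (PySem.List.pyGetD rd j []).map fun tj => (ti, tj))
      (F := fun st j =>
        (PySem.List.pyGetD rd j []).foldl
          (fun st tj => (st.1 ++ [(ti, tj)], st.2 ++ [(1 : Int)])) st)
      (by intro o l j; exact h1 ti (PySem.List.pyGetD rd j []) o l) _ o l
  have h3 : ∀ (i : Int) (o : List (List Int × List Int)) (l : List Int),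
      (PySem.List.pyGetD rd i []).foldl
        (fun st ti =>
          (PySem.List.pyRange (i + 1) (rd.length : Int) 1).foldl
            (fun st j =>
              (PySem.List.pyGetD rd j []).foldl
                (fun st tj => (st.1 ++ [(ti, tj)], st.2 ++ [(1 : Int)])) st) st) (o, l)
      = (o ++ ((PySem.List.pyGetD rd i []).flatMap fun ti =>
                (PySem.List.pyRange (i + 1) (rd.length : Int) 1).flatMap fun j =>
                  (PySem.List.pyGetD rd j []).map fun tj => (ti, tj)),
         l ++ List.replicate ((PySem.List.pyGetD rd i []).flatMap fun ti =>
                (PySem.List.pyRange (i + 1) (rd.length : Int) 1).flatMap fun j =>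
                  (PySem.List.pyGetD rd j []).map fun tj => (ti, tj)).length 1) := by
    intro i o l
    exact pv_foldl_pair_shape
      (g := fun ti => (PySem.List.pyRange (i + 1) (rd.length : Int) 1).flatMap fun j =>
        (PySem.List.pyGetD rd j []).map fun tj => (ti, tj))
      (F := fun st ti =>
        (PySem.List.pyRange (i + 1) (rd.length : Int) 1).foldl
          (fun st j =>
            (PySem.List.pyGetD rd j []).foldl
              (fun st tj => (st.1 ++ [(ti, tj)], st.2 ++ [(1 : Int)])) st) st)
      (by intro o l ti; exact h2 i ti o l) _ o l
  have h4 := pv_foldl_pair_shape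
    (g := fun i => (PySem.List.pyGetD rd i []).flatMap fun ti =>
      (PySem.List.pyRange (i + 1) (rd.length : Int) 1).flatMap fun j =>
        (PySem.List.pyGetD rd j []).map fun tj => (ti, tj))
    (F := fun st i =>
      (PySem.List.pyGetD rd i []).foldl
        (fun st ti =>
          (PySem.List.pyRange (i + 1) (rd.length : Int) 1).foldl
            (fun st j =>
              (PySem.List.pyGetD rd j []).foldl
                (fun st tj => (st.1 ++ [(ti, tj)], st.2 ++ [(1 : Int)])) st) st) st)
    (by intro o l i; exact h3 i o l) (PySem.List.pyRange 0 (rd.length : Int) 1) [] []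
  simpa [create_training_data_from_bins, pvObs] using h4

lemma pv_altGo_fst (rd : List (List (List Int))) : (pvAltGo rd).1 = rd.flatten := by
  induction rd with
  | nil => simp [pvAltGo]
  | cons b rest ih => simp [pvAltGo, ih]

-- concatenating the per-bin pair lists equals pairing against the flattened suffix
lemma pv_flatMap_map {a b : Type} (L : List (List a)) (f : a -> b) :
    (L.flatMap fun c => c.map f) = L.flatten.map f := by
  induction L with
  | nil => rfl
  | cons c cs ih => simp [ih]

-- A's output in List.range / getD / drop form equals B's chunk accumulator
lemma pv_key (rd : List (List (List Int))) :
    ((List.range rd.length).flatMap fun k =>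
      (rd.getD k []).flatMap fun ti =>
        (rd.drop (k + 1)).flatMap fun bj => bj.map fun tj => (ti, tj))
    = (pvAltGo rd).2 := by
  induction rd with
  | nil => simp [pvAltGo]
  | cons b rest ih =>
    rw [List.length_cons, List.range_succ_eq_map]
    simp only [List.flatMap_cons, List.flatMap_map, List.getD_cons_zero, List.getD_cons_succ,
      List.drop_succ_cons, List.drop_zero]
    rw [ih]
    have hrhs : (pvAltGo (b :: rest)).2
        = (b.flatMap fun ti => (pvAltGo rest).1.map fun tj => (ti, tj)) ++ (pvAltGo rest).2 := rfl
    rw [hrhs]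
    congr 1
    refine congrArg (fun f => List.flatMap f b) (funext fun ti => ?_)
    rw [pv_altGo_fst, pv_flatMap_map]

lemma pv_inner_eq (rd : List (List (List Int))) (k : Nat) (ti : List Int) :
    ((PySem.List.pyRange ((k : Int) + 1) (rd.length : Int) 1).flatMap fun j =>
      (PySem.List.pyGetD rd j []).map fun tj => (ti, tj))
    = (rd.drop (k + 1)).flatMap fun bj => bj.map fun tj => (ti, tj) := by
  rw [← List.flatMap_map (fun j => PySem.List.pyGetD rd j [])
        (fun bj => bj.map fun tj => (ti, tj))]
  rw [PySem.List.map_pyGetD_pyRange' rd [] (by omega : (0 : Int) ≤ (k : Int) + 1)]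
  have h : ((k : Int) + 1).toNat = k + 1 := by omega
  rw [h]

lemma pv_body_eq (rd : List (List (List Int))) (k : Nat) :
    ((PySem.List.pyGetD rd (k : Int) []).flatMap fun ti =>
      (PySem.List.pyRange ((k : Int) + 1) (rd.length : Int) 1).flatMap fun j =>
        (PySem.List.pyGetD rd j []).map fun tj => (ti, tj))
    = (rd.getD k []).flatMap fun ti =>
        (rd.drop (k + 1)).flatMap fun bj => bj.map fun tj => (ti, tj) := by
  rw [PySem.List.pyGetD_natCast]
  exact congrArg (fun f => List.flatMap f (rd.getD k []))
    (funext fun ti => pv_inner_eq rd k ti)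

lemma pv_obs_eq (rd : List (List (List Int))) : pvObs rd = (pvAltGo rd).2 := by
  unfold pvObs
  rw [PySem.List.pyRange_zero_natCast, List.flatMap_map]
  simp only [pv_body_eq]
  exact pv_key rd

-- ===== VERDICT (by name: the statement is the Claim_ definition above) =====
theorem create_training_data_from_bins_spec : Claim_equal_create_training_data_from_bins := by
  intro rd _
  unfold Spec_create_training_data_from_bins create_training_data_from_bins_alt
  rw [pv_A_eq, pv_obs_eq]
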